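-- pv_equiv track=rewrite | github.com/maiconrp/estacao-meteorologica | testes-estacao/Utils/historicos.py | filtrar_horas_proximas
-- ===== SOURCE A (Python) =====
-- def filtrar_horas_proximas(dicio):
--     novo_dict = {}
--
--     for hora, valor in dicio.items():
--         hora_proxima = hora[:2] + ":00"  # Extrair apenas a parte da hora e adicionar ":00"
--
--         if hora_proxima not in novo_dict:
--             novo_dict[hora_proxima] = (hora, valor)  # Armazenar o par (hora, valor)
--
--         else:
--             hora_atual, valor_atual = novo_dict[hora_proxima]  # Valor já armazenado
--
--             diff_proxima = abs(int(hora.split(":")[1]) - int(hora_proxima.split(":")[1]))  # Diferença entre os minutos da hora atual e a próxima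
--             diff_atual = abs(int(hora_atual.split(":")[1]) - int(hora_proxima.split(":")[1]))  # Diferença entre os minutos da hora já armazenada e a próxima
--
--             if diff_proxima < diff_atual:
--                 novo_dict[hora_proxima] = (hora, valor)  # Substituir o par armazenado pelo par correspondente à hora mais próxima
--
--     novo_dict = {hora: valor for hora, valor in novo_dict.values()}  # Remover a hora original e manter apenas a hora mais próxima e o valor associado
--
--     # Adicionar manualmente o índice '14:00' caso não esteja presente no dicionário
--
--     return novo_dict
-- ===== SOURCE B (Python) =====
-- def filtrar_horas_proximas(dicio):
--     # Two-phase: group entries by hour bucket, then reduce each group to the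
--     # entry whose minutes are closest to the bucket's (first wins on ties).
--     grupos = {}
--     for hora, valor in dicio.items():
--         grupos.setdefault(hora[:2] + ":00", []).append((hora, valor))
--
--     def escolher(alvo, grupo):
--         melhor = grupo[0]
--         for hora, valor in grupo[1:]:
--             if abs(int(hora.split(":")[1]) - int(alvo.split(":")[1])) < abs(int(melhor[0].split(":")[1]) - int(alvo.split(":")[1])):
--                 melhor = (hora, valor)
--         return melhor
--
--     return dict(escolher(alvo, grupo) for alvo, grupo in grupos.items())
-- ===== Notes on version B (the rewrite author's own statement) =====
-- stated objective: alternative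
-- what changed: A keeps one best (hora, valor) per hour bucket online in a dict with membership tests and in-place replacement; B first groups all entries by bucket with setdefault/append and then reduces each group separately to the entry whose minutes are closest to the bucket (first wins on ties), finally rebuilding the dict from the selected pairs.
import Mathlib
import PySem

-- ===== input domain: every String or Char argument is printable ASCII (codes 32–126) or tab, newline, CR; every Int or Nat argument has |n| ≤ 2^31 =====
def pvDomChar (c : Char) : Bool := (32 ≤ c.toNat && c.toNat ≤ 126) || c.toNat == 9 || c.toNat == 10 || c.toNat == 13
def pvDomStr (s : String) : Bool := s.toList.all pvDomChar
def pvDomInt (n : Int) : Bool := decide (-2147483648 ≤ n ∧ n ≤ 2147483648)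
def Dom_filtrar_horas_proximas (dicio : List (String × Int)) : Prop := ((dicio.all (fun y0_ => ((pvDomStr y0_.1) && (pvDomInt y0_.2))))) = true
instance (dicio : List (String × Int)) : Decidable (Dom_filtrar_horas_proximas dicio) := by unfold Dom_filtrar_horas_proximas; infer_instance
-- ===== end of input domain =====

-- B replaces A's online keep-best dict bookkeeping by a two-phase group-by-bucket
-- then per-group reduction (simpler decomposition, same cost).


-- ===== shared helpers (both Python versions compute these same sub-expressions) =====

-- hora[:2] + ":00" — str slice and concatenation done on the char list (exact for str[:2] + str)
def pvBucket (h : String) : String :=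
  String.ofList (PySem.List.slice h.toList none (some 2) ++ [':', '0', '0'])

-- int(h.split(":")[1]) — none exactly where Python raises (IndexError / ValueError);
-- the separator ":" is nonempty, so split? always returns some
def pvMinute? (h : String) : Option Int :=
  match PySem.List.pyGet? ((PySem.Str.split? h ":").getD []) 1 with
  | some s => PySem.Int.ofStr? s
  | none => none

-- total stand-in used inside the loops; Pre_ guarantees every parse the loops reach is `some`
def pvMinuteD (h : String) : Int := (pvMinute? h).getD 0

-- ===== PORT A =====
-- loop body of A's 'for hora, valor in dicio.items()'
def pvStepA (nd : PySem.Dict String (String × Int)) (p : String × Int) :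
    PySem.Dict String (String × Int) :=
  let hora_proxima := pvBucket p.1
  if nd.contains hora_proxima = false then
    nd.insert hora_proxima (p.1, p.2)
  else
    let atual := nd.getD hora_proxima ("", 0)  -- key is present on this branch; default unused
    let diff_proxima := |pvMinuteD p.1 - pvMinuteD hora_proxima|
    let diff_atual := |pvMinuteD atual.1 - pvMinuteD hora_proxima|
    if diff_proxima < diff_atual then nd.insert hora_proxima (p.1, p.2) else nd

def filtrar_horas_proximas (dicio : List (String × Int)) : List (String × Int) :=
  let novo_dict := dicio.foldl pvStepA PySem.Dict.empty
  -- {hora: valor for hora, valor in novo_dict.values()}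
  (novo_dict.values.foldl (fun (d : PySem.Dict String Int) q => d.insert q.1 q.2)
      PySem.Dict.empty).items

-- ===== PORT B =====
-- B's helper 'escolher': reduce one bucket's group to its kept entry (first wins on ties)
def pvEscolher (alvo : String) (grupo : List (String × Int)) : String × Int :=
  match grupo with
  | [] => ("", 0)  -- unreachable: every group has at least one member
  | melhor :: resto =>
      resto.foldl
        (fun melhor q =>
          if |pvMinuteD q.1 - pvMinuteD alvo| < |pvMinuteD melhor.1 - pvMinuteD alvo| then q
          else melhor)
        melhor

def filtrar_horas_proximas_alt (dicio : List (String × Int)) : List (String × Int) :=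
  -- grupos.setdefault(hora[:2] + ":00", []).append((hora, valor))
  let grupos :=
    dicio.foldl
      (fun (g : PySem.Dict String (List (String × Int))) p =>
        g.modify (pvBucket p.1) [] (fun l => l ++ [p]))
      PySem.Dict.empty
  -- dict(escolher(alvo, grupo) for alvo, grupo in grupos.items())
  ((grupos.items.map (fun bg => pvEscolher bg.1 bg.2)).foldl
      (fun (d : PySem.Dict String Int) q => d.insert q.1 q.2) PySem.Dict.empty).items

-- ===== PRECONDITION & SPEC =====
-- Pre_ is exactly where Python A returns: minutes are only ever parsed for entries whose
-- hour bucket occurs at least twice, and there both versions parse the entry's minute part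
-- and the bucket's; everywhere else neither program parses anything.
def Pre_filtrar_horas_proximas (dicio : List (String × Int)) : Prop :=
  ∀ p ∈ dicio,
    2 ≤ dicio.countP (fun q => pvBucket q.1 == pvBucket p.1) →
      (pvMinute? p.1).isSome = true ∧ (pvMinute? (pvBucket p.1)).isSome = true

instance (dicio : List (String × Int)) : Decidable (Pre_filtrar_horas_proximas dicio) := by
  unfold Pre_filtrar_horas_proximas; infer_instance

def pvWitness_filtrar_horas_proximas : (List (String × Int)) :=
  [("12:05", 1), ("12:20", 2), ("13:07", 3)]

def Spec_filtrar_horas_proximas (dicio : List (String × Int)) (out : List (String × Int)) : Prop := out = filtrar_horas_proximas_alt dicio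
instance (dicio : List (String × Int)) (out : List (String × Int)) : Decidable (Spec_filtrar_horas_proximas dicio out) := by unfold Spec_filtrar_horas_proximas; infer_instance

-- ===== CLAIM (what is proved, stated in full; the proofs are below) =====
def Claim_equal_filtrar_horas_proximas : Prop := ∀ (dicio : List (String × Int)), Dom_filtrar_horas_proximas dicio → Pre_filtrar_horas_proximas dicio → Spec_filtrar_horas_proximas dicio (filtrar_horas_proximas dicio)

-- ===== LEMMAS AND PROOFS =====

-- the "selected entry" view of a grouping dict: A's accumulator is B's accumulator
-- with every group already reduced by pvEscolher
def pvF (g : PySem.Dict String (List (String × Int))) : PySem.Dict String (String × Int) :=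
  PySem.Dict.mk (g.items.map (fun bg => (bg.1, pvEscolher bg.1 bg.2)))

lemma pvEscolher_append (alvo : String) (grupo : List (String × Int)) (p : String × Int)
    (h : grupo ≠ []) :
    pvEscolher alvo (grupo ++ [p]) =
      if |pvMinuteD p.1 - pvMinuteD alvo| < |pvMinuteD (pvEscolher alvo grupo).1 - pvMinuteD alvo|
      then p else pvEscolher alvo grupo := by
  cases grupo with
  | nil => exact absurd rfl h
  | cons m resto => simp [pvEscolher, List.foldl_append]

lemma pvF_keys (g : PySem.Dict String (List (String × Int))) : (pvF g).keys = g.keys := by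
  simp [pvF, List.map_map, PySem.Dict.keys]

lemma pvF_contains (g : PySem.Dict String (List (String × Int))) (k : String) :
    (pvF g).contains k = g.contains k := by
  cases g with
  | mk items =>
    simp [pvF, PySem.Dict.contains_mk, List.any_map, Function.comp_def]

lemma pv_step (g : PySem.Dict String (List (String × Int))) (p : String × Int)
    (hnd : g.keys.Nodup) (hne : ∀ kv ∈ g.items, kv.2 ≠ []) :
    pvStepA (pvF g) p = pvF (g.modify (pvBucket p.1) [] (fun l => l ++ [p])) := by
  rw [PySem.Dict.modify.eq_def]
  by_cases hc : g.contains (pvBucket p.1) = true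
  · -- bucket already present: A compares against the stored entry, B appends to the group
    obtain ⟨grupo, hget⟩ : ∃ v, g.get? (pvBucket p.1) = some v := by
      have := PySem.Dict.contains_eq_isSome_get? g (pvBucket p.1)
      rw [hc] at this
      exact Option.isSome_iff_exists.mp this.symm
    have hmem : (pvBucket p.1, grupo) ∈ g.items :=
      (PySem.Dict.get?_eq_some_iff_mem_items g _ _ hnd).mp hget
    have hgrne : grupo ≠ [] := hne _ hmem
    have hFmem : (pvBucket p.1, pvEscolher (pvBucket p.1) grupo) ∈ (pvF g).items := by
      simp only [pvF]
      exact List.mem_map.mpr ⟨(pvBucket p.1, grupo), hmem, rfl⟩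
    have hFnd : (pvF g).keys.Nodup := by rw [pvF_keys]; exact hnd
    have hFgetD : (pvF g).getD (pvBucket p.1) ("", 0) = pvEscolher (pvBucket p.1) grupo :=
      PySem.Dict.getD_of_mem_items _ hFmem hFnd _
    have hgetD : g.getD (pvBucket p.1) [] = grupo :=
      PySem.Dict.getD_of_mem_items _ hmem hnd _
    have hFc : (pvF g).contains (pvBucket p.1) = true := by rw [pvF_contains]; exact hc
    -- items of both inserts are maps over g.items; compare pointwise on members
    have hAins : ∀ w : String × Int,
        ((pvF g).insert (pvBucket p.1) w).items =
          List.map (fun bg : String × List (String × Int) =>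
            if (bg.1 == pvBucket p.1) = true then (pvBucket p.1, w)
            else (bg.1, pvEscolher bg.1 bg.2)) g.items := by
      intro w
      rw [PySem.Dict.items_insert_of_contains _ _ hFc]
      simp only [pvF, List.map_map]
      rfl
    have hBins :
        (pvF (g.insert (pvBucket p.1) (grupo ++ [p]))).items =
          List.map (fun bg : String × List (String × Int) =>
            if (bg.1 == pvBucket p.1) = true
            then (pvBucket p.1, pvEscolher (pvBucket p.1) (grupo ++ [p]))
            else (bg.1, pvEscolher bg.1 bg.2)) g.items := by
      simp only [pvF]
      rw [PySem.Dict.items_insert_of_contains _ _ hc]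
      rw [List.map_map]
      refine List.map_congr_left ?_
      intro bg _
      by_cases hb : (bg.1 == pvBucket p.1) = true
      · simp [Function.comp, hb]
      · simp [Function.comp, hb]
    have hesc := pvEscolher_append (pvBucket p.1) grupo p hgrne
    simp only [pvStepA, hFc, Bool.true_eq_false, if_false, hFgetD]
    by_cases hlt :
        |pvMinuteD p.1 - pvMinuteD (pvBucket p.1)| <
          |pvMinuteD (pvEscolher (pvBucket p.1) grupo).1 - pvMinuteD (pvBucket p.1)| 
    · -- the new entry wins: both sides replace the stored value by p
      rw [if_pos hlt]
      apply PySem.Dict.ext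
      rw [hgetD, hBins, hAins p]
      refine List.map_congr_left ?_
      intro bg _
      by_cases hb : (bg.1 == pvBucket p.1) = true
      · rw [hesc]
        simp [hb, hlt]
      · simp [hb]
    · -- the stored entry stays: B's map rewrites the group, A keeps the dict unchanged
      rw [if_neg hlt]
      apply PySem.Dict.ext
      rw [hgetD, hBins]
      simp only [pvF]
      refine (List.map_congr_left ?_).symm
      intro bg hbg
      by_cases hb : (bg.1 == pvBucket p.1) = true
      · -- nodup keys: the only member with this key is (pvBucket p.1, grupo)
        have hb' : bg.1 = pvBucket p.1 := by simpa using hb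
        have : bg.2 = grupo := by
          have h1 : g.get? bg.1 = some bg.2 :=
            (PySem.Dict.get?_eq_some_iff_mem_items g _ _ hnd).mpr (by
              simpa using hbg)
          rw [hb', hget] at h1
          exact (Option.some_injective _ h1).symm
        rw [hesc]
        simp [hb', this, hlt]
      · simp [hb]
  · -- fresh bucket: both sides append a new entry
    have hc' : g.contains (pvBucket p.1) = false := by
      cases h : g.contains (pvBucket p.1) with
      | true => exact absurd h hc
      | false => rfl
    have hFc : (pvF g).contains (pvBucket p.1) = false := by rw [pvF_contains]; exact hc'
    have hgetD : g.getD (pvBucket p.1) [] = [] := by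
      unfold PySem.Dict.getD
      rw [(PySem.Dict.get?_eq_none_iff_contains g _).mpr hc']
      rfl
    simp only [pvStepA, hFc, if_true]
    apply PySem.Dict.ext
    rw [PySem.Dict.items_insert_of_not_contains _ _ hFc]
    simp only [pvF, hgetD]
    rw [PySem.Dict.items_insert_of_not_contains _ _ hc']
    simp [pvEscolher]

lemma pv_nodup_step (g : PySem.Dict String (List (String × Int))) (p : String × Int)
    (hnd : g.keys.Nodup) :
    (g.modify (pvBucket p.1) [] (fun l => l ++ [p])).keys.Nodup := by
  rw [PySem.Dict.modify.eq_def]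
  exact PySem.Dict.nodup_keys_insert _ _ _ hnd

lemma pv_ne_step (g : PySem.Dict String (List (String × Int))) (p : String × Int)
    (hne : ∀ kv ∈ g.items, kv.2 ≠ []) :
    ∀ kv ∈ (g.modify (pvBucket p.1) [] (fun l => l ++ [p])).items, kv.2 ≠ [] := by
  rw [PySem.Dict.modify.eq_def]
  intro kv hkv
  rcases (PySem.Dict.mem_items_insert _ _ _ _).mp hkv with h | ⟨h, _⟩
  · subst h; simp
  · exact hne _ h

lemma pv_inv (l : List (String × Int)) :
    ∀ (g : PySem.Dict String (List (String × Int))),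
      g.keys.Nodup → (∀ kv ∈ g.items, kv.2 ≠ []) →
      l.foldl pvStepA (pvF g) =
        pvF (l.foldl
          (fun g p => g.modify (pvBucket p.1) [] (fun l => l ++ [p])) g) := by
  induction l with
  | nil => intro g _ _; rfl
  | cons p t ih =>
    intro g hnd hne
    simp only [List.foldl_cons]
    rw [pv_step g p hnd hne]
    exact ih _ (pv_nodup_step g p hnd) (pv_ne_step g p hne)

-- ===== VERDICT (by name: the statement is the Claim_ definition above) =====
theorem filtrar_horas_proximas_spec : Claim_equal_filtrar_horas_proximas := by
  intro dicio _ _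
  unfold Spec_filtrar_horas_proximas
  unfold filtrar_horas_proximas filtrar_horas_proximas_alt
  have h0 : (PySem.Dict.empty : PySem.Dict String (String × Int)) = pvF PySem.Dict.empty := rfl
  rw [h0, pv_inv dicio PySem.Dict.empty (by simp [PySem.Dict.empty, PySem.Dict.keys]) (by
    intro kv hkv; simp [PySem.Dict.empty] at hkv)]
  simp only [pvF, PySem.Dict.values, List.map_map]
  rfl
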